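-- pv_equiv track=rewrite | github.com/gbourniq/document-analyser | app/functions.py | search_sentences
-- ===== SOURCE A (Python) =====
-- def search_sentences(datadict, doc_name, search_word):
--     """
--     Returns sentences containing a given word, from a document
--     """
--
--     extracted_sentences = ""
--     word_counts = 0
--
--     for sentence in datadict[doc_name]:
--         extracted_words = []
--         if search_word.lower() in sentence.lower().split():
--             for word in sentence.split():
--                 if search_word.lower() == word.lower():
--                     word = "<b>"+word+"</b>"
--                     extracted_words.append(word)
--                     word_counts += 1
--                 else:
--                     extracted_words.append(word)
--             extracted_sentences += " ".join(extracted_words)+"<br>"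
--     extracted_sentences += "<br><br>"
--     return extracted_sentences, word_counts
-- ===== SOURCE B (Python) =====
-- def search_sentences(datadict, doc_name, search_word):
--     """
--     Returns sentences containing a given word, from a document.
--     Recursive decomposition: process the tail first and prepend this
--     sentence's line (back-to-front construction); the gate is a count
--     over the lowercased token list instead of a membership re-scan.
--     """
--     target = search_word.lower()
--
--     def go(sentences):
--         if not sentences:
--             return "<br><br>", 0
--         rest, n = go(sentences[1:])
--         words = sentences[0].split()
--         c = [w.lower() for w in words].count(target)
--         if c == 0:
--             return rest, n
--         line = " ".join(w if w.lower() != target else "<b>" + w + "</b>"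
--                         for w in words)
--         return line + "<br>" + rest, n + c
--
--     return go(datadict[doc_name])
-- ===== Notes on version B (the rewrite author's own statement) =====
-- stated objective: alternative
-- what changed: B is a recursive back-to-front construction: it recurses on the tail of the sentence list and prepends each sentence's line, gating on the count of the target in the lowercased token list (computed once) instead of A's membership test over a second lower+split, and counting per sentence instead of interleaving a global counter through the scan.
import Mathlib
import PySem

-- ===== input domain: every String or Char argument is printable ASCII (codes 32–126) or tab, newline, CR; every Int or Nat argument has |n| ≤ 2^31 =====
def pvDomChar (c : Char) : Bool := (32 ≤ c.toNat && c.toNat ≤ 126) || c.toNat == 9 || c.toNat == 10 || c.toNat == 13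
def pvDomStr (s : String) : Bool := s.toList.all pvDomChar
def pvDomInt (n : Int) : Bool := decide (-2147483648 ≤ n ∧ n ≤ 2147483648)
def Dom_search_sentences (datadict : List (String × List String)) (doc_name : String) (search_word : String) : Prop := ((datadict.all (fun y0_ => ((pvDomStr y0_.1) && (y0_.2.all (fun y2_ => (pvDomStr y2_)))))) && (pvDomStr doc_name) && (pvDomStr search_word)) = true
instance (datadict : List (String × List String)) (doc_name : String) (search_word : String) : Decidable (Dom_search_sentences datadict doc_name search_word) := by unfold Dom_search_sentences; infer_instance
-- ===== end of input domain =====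

-- B rebuilds the result recursively back-to-front (tail first, prepend each line), gating each
-- sentence on the count of the target in its lowercased token list instead of A's membership
-- re-scan; same cost class — the objective is the alternative decomposition, not speed.

-- ===== PORT A =====
-- A's per-sentence inner loop: build extracted_words and bump word_counts
def pvInnerA (target : List Char) (words : List (List Char)) (k : Int) : List (List Char) × Int :=
  words.foldl
    (fun st2 word =>
      if target = PySem.Chars.lower word then
        (st2.1 ++ ["<b>".toList ++ word ++ "</b>".toList], st2.2 + 1)
      else
        (st2.1 ++ [word], st2.2))
    ([], k)

-- A's per-sentence body: membership pre-check, then rescan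
def pvStepA (target : List Char) (st : List Char × Int) (sentence : String) : List Char × Int :=
  if target ∈ PySem.Chars.split₀ (PySem.Chars.lower sentence.toList) then
    let p := pvInnerA target (PySem.Chars.split₀ sentence.toList) st.2
    (st.1 ++ PySem.Chars.join " ".toList p.1 ++ "<br>".toList, p.2)
  else st

def search_sentences (datadict : List (String × List String)) (doc_name : String) (search_word : String) : String × Int :=
  match datadict.lookup doc_name with
  | none => ("", 0)  -- Python raises KeyError here; excluded by Pre_
  | some sentences =>
    let st := sentences.foldl (pvStepA (PySem.Chars.lower search_word.toList)) ([], 0)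
    (String.mk (st.1 ++ "<br><br>".toList), st.2)

-- ===== PORT B =====
-- B's recursion: tail first, then prepend this sentence's line when its match count is nonzero
def pvGoB (target : List Char) : List String → List Char × Int
  | [] => ("<br><br>".toList, 0)
  | s :: rest =>
    let r := pvGoB target rest
    let ws := PySem.Chars.split₀ s.toList
    let c := PySem.List.count (ws.map PySem.Chars.lower) target
    if c = 0 then r
    else (PySem.Chars.join " ".toList
            (ws.map (fun w => if PySem.Chars.lower w ≠ target then w
                              else "<b>".toList ++ w ++ "</b>".toList))
          ++ "<br>".toList ++ r.1, r.2 + c)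

def search_sentences_alt (datadict : List (String × List String)) (doc_name : String) (search_word : String) : String × Int :=
  match datadict.lookup doc_name with
  | none => ("", 0)  -- Python raises KeyError here; excluded by Pre_
  | some sentences =>
    let r := pvGoB (PySem.Chars.lower search_word.toList) sentences
    (String.mk r.1, r.2)

-- ===== PRECONDITION & SPEC =====
-- Pre_ excludes exactly the inputs where datadict[doc_name] raises KeyError in Python (in A and in B alike).
def Pre_search_sentences (datadict : List (String × List String)) (doc_name : String) (search_word : String) : Prop :=
  (datadict.lookup doc_name).isSome = true
instance (datadict : List (String × List String)) (doc_name : String) (search_word : String) : Decidable (Pre_search_sentences datadict doc_name search_word) := by unfold Pre_search_sentences; infer_instance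

def pvWitness_search_sentences : (List (String × List String)) × String × String :=
  ([("doc", ["The cat sat", "no match here", "Cat CAT dog"])], "doc", "cat")

def Spec_search_sentences (datadict : List (String × List String)) (doc_name : String) (search_word : String) (out : String × Int) : Prop := out = search_sentences_alt datadict doc_name search_word
instance (datadict : List (String × List String)) (doc_name : String) (search_word : String) (out : String × Int) : Decidable (Spec_search_sentences datadict doc_name search_word out) := by unfold Spec_search_sentences; infer_instance

-- ===== CLAIM =====
def Claim_equal_search_sentences : Prop := ∀ (datadict : List (String × List String)) (doc_name : String) (search_word : String), Dom_search_sentences datadict doc_name search_word → Pre_search_sentences datadict doc_name search_word → Spec_search_sentences datadict doc_name search_word (search_sentences datadict doc_name search_word)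

-- ===== LEMMAS AND PROOFS =====

-- lowering a character does not change whether it is whitespace
theorem pv_isspace_lowerChar (c : Char) :
    PySem.Chars.isspace (PySem.Chars.lowerChar c) = PySem.Chars.isspace c := by
  simp only [PySem.Chars.lowerChar, PySem.Chars.isupper]
  split_ifs with h
  · simp only [Bool.and_eq_true, decide_eq_true_eq] at h
    obtain ⟨h1, h2⟩ := h
    have hA : 65 ≤ c.toNat := h1
    have hZ : c.toNat ≤ 90 := h2
    have hvalid : (c.toNat + 32).isValidChar := Or.inl (by omega)
    have hv : (Char.ofNat (c.toNat + 32)).toNat = c.toNat + 32 := by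
      unfold Char.ofNat
      split
      · rfl
      · exact absurd hvalid (by assumption)
    simp only [PySem.Chars.isspace]
    rw [hv]
    apply Bool.eq_iff_iff.mpr
    simp only [Bool.or_eq_true, Bool.and_eq_true, decide_eq_true_eq]
    omega
  · rfl

-- split₀ commutes with per-character lowering (whitespace is unchanged by lowering)
theorem pv_split₀_go_lower (s cur : List Char) (accs : List (List Char)) :
    PySem.Chars.split₀.go (s.map PySem.Chars.lowerChar) (cur.map PySem.Chars.lowerChar)
        (accs.map (List.map PySem.Chars.lowerChar))
      = (PySem.Chars.split₀.go s cur accs).map (List.map PySem.Chars.lowerChar) := by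
  induction s generalizing cur accs with
  | nil =>
    by_cases h : cur.isEmpty
    · have h' : (cur.map PySem.Chars.lowerChar).isEmpty = true := by
        simp only [List.isEmpty_iff] at h ⊢; simp [h]
      simp [PySem.Chars.split₀.go, h, h', List.map_reverse]
    · have h' : (cur.map PySem.Chars.lowerChar).isEmpty = false := by
        simp only [List.isEmpty_eq_false_iff] at h ⊢
        simpa using h
      simp [PySem.Chars.split₀.go, h, h', List.map_reverse]
  | cons c rest ih =>
    by_cases hs : PySem.Chars.isspace c
    · by_cases h : cur.isEmpty
      · have h' : (cur.map PySem.Chars.lowerChar).isEmpty = true := by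
          simp only [List.isEmpty_iff] at h ⊢; simp [h]
        simp only [List.map_cons, PySem.Chars.split₀.go, pv_isspace_lowerChar, hs, h, h',
          if_true]
        simpa using ih [] accs
      · have h' : (cur.map PySem.Chars.lowerChar).isEmpty = false := by
          simp only [List.isEmpty_eq_false_iff] at h ⊢
          simpa using h
        simp only [List.map_cons, PySem.Chars.split₀.go, pv_isspace_lowerChar, hs, h, h',
          if_true, Bool.false_eq_true, if_false]
        have := ih [] ((cur.reverse) :: accs)
        simpa [List.map_reverse] using this
    · simp only [List.map_cons, PySem.Chars.split₀.go, pv_isspace_lowerChar, hs,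
        Bool.false_eq_true, if_false]
      exact ih (c :: cur) accs

theorem pv_split₀_lower (s : List Char) :
    PySem.Chars.split₀ (PySem.Chars.lower s)
      = (PySem.Chars.split₀ s).map PySem.Chars.lower := by
  have := pv_split₀_go_lower s [] []
  simpa [PySem.Chars.split₀, PySem.Chars.lower] using this

-- closed forms of A's inner loop
def pvWrap (target : List Char) (w : List Char) : List Char :=
  if PySem.Chars.lower w = target then "<b>".toList ++ w ++ "</b>".toList else w

def pvCnt (target : List Char) (words : List (List Char)) : Int :=
  ((words.filter (fun w => PySem.Chars.lower w = target)).length : Int)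

theorem pvInnerA_eq_gen (target : List Char) (words : List (List Char)) (k : Int) (acc : List (List Char)) :
    words.foldl
      (fun st2 word =>
        if target = PySem.Chars.lower word then
          (st2.1 ++ ["<b>".toList ++ word ++ "</b>".toList], st2.2 + 1)
        else (st2.1 ++ [word], st2.2)) (acc, k)
    = (acc ++ words.map (pvWrap target), k + pvCnt target words) := by
  induction words generalizing acc k with
  | nil => simp [pvCnt]
  | cons w ws ih =>
    simp only [List.foldl_cons]
    by_cases h : PySem.Chars.lower w = target
    · rw [if_pos h.symm, ih]
      simp [pvWrap, pvCnt, List.filter_cons, h]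
      push_cast; ring
    · rw [if_neg (fun e => h e.symm), ih]
      simp [pvWrap, pvCnt, List.filter_cons, h]

theorem pvInnerA_eq (target : List Char) (words : List (List Char)) (k : Int) :
    pvInnerA target words k = (words.map (pvWrap target), k + pvCnt target words) := by
  unfold pvInnerA
  simpa using pvInnerA_eq_gen target words k []

-- B's count over the lowered token list is pvCnt
theorem pv_count_eq (target : List Char) (ws : List (List Char)) :
    PySem.List.count (ws.map PySem.Chars.lower) target = pvCnt target ws := by
  rw [PySem.List.count_eq]
  unfold pvCnt
  rw [List.count_eq_countP, List.countP_map, List.countP_eq_length_filter]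
  congr 2
  apply List.filter_congr
  intro w _
  exact beq_eq_decide _ _

-- B's wrapping function (flipped if) is pvWrap
theorem pv_mapWrap_eq (target : List Char) (ws : List (List Char)) :
    ws.map (fun w => if PySem.Chars.lower w ≠ target then w
                     else "<b>".toList ++ w ++ "</b>".toList)
      = ws.map (pvWrap target) := by
  apply List.map_congr_left
  intro w _
  by_cases h : PySem.Chars.lower w = target <;> simp [pvWrap, h]

-- the gate: A's membership test holds iff the match count is nonzero
theorem pv_gate (target sc : List Char) :
    target ∈ PySem.Chars.split₀ (PySem.Chars.lower sc) ↔ pvCnt target (PySem.Chars.split₀ sc) ≠ 0 := by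
  rw [pv_split₀_lower]
  unfold pvCnt
  rw [List.mem_map]
  constructor
  · rintro ⟨w, hw, he⟩
    have hmem : w ∈ (PySem.Chars.split₀ sc).filter (fun w => PySem.Chars.lower w = target) := by
      simp [List.mem_filter, hw, he]
    intro hz
    have hne := List.ne_nil_of_mem hmem
    have hlen := List.length_pos_iff.mpr hne
    omega
  · intro hz
    have hne : ((PySem.Chars.split₀ sc).filter (fun w => PySem.Chars.lower w = target)) ≠ [] := by
      intro hnil; rw [hnil] at hz; simp at hz
    obtain ⟨w, hw⟩ := List.exists_mem_of_ne_nil _ hne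
    rw [List.mem_filter] at hw
    have h2 : PySem.Chars.lower w = target := by simpa using hw.2
    exact ⟨w, hw.1, h2⟩

-- A's left fold, with the trailing "<br><br>", equals B's back-to-front recursion
theorem pv_foldA_goB (t : List Char) (ss : List String) (acc : List Char) (k : Int) :
    (ss.foldl (pvStepA t) (acc, k)).1 ++ "<br><br>".toList = acc ++ (pvGoB t ss).1
  ∧ (ss.foldl (pvStepA t) (acc, k)).2 = k + (pvGoB t ss).2 := by
  induction ss generalizing acc k with
  | nil => simp [pvGoB]
  | cons s rest ih =>
    simp only [List.foldl_cons, pvGoB]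
    by_cases hg : t ∈ PySem.Chars.split₀ (PySem.Chars.lower s.toList)
    · have hc := (pv_gate t s.toList).mp hg
      have hc' : ¬ PySem.List.count ((PySem.Chars.split₀ s.toList).map PySem.Chars.lower) t = 0 := by
        intro h0
        have hh := pv_count_eq t (PySem.Chars.split₀ s.toList)
        rw [h0] at hh
        exact hc (by simpa using hh.symm)
      rw [if_neg hc', pv_mapWrap_eq, pv_count_eq]
      have hstepA : pvStepA t (acc, k) s
          = (acc ++ PySem.Chars.join " ".toList ((PySem.Chars.split₀ s.toList).map (pvWrap t)) ++ "<br>".toList,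
             k + pvCnt t (PySem.Chars.split₀ s.toList)) := by
        unfold pvStepA
        rw [if_pos hg, pvInnerA_eq]
      rw [hstepA]
      obtain ⟨h1, h2⟩ := ih (acc ++ PySem.Chars.join " ".toList ((PySem.Chars.split₀ s.toList).map (pvWrap t)) ++ "<br>".toList)
        (k + pvCnt t (PySem.Chars.split₀ s.toList))
      constructor
      · rw [h1]; simp
      · rw [h2]; ring
    · have hc : pvCnt t (PySem.Chars.split₀ s.toList) = 0 := by
        by_contra hne; exact hg ((pv_gate t s.toList).mpr hne)
      have hc' : PySem.List.count ((PySem.Chars.split₀ s.toList).map PySem.Chars.lower) t = 0 := by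
        have hh := pv_count_eq t (PySem.Chars.split₀ s.toList)
        rw [hc] at hh
        exact_mod_cast hh
      have hstepA : pvStepA t (acc, k) s = (acc, k) := by
        unfold pvStepA; rw [if_neg hg]
      rw [hstepA, if_pos hc']
      exact ih acc k

-- ===== VERDICT =====
theorem search_sentences_spec : Claim_equal_search_sentences := by
  intro datadict doc_name search_word _ hpre
  unfold Spec_search_sentences search_sentences search_sentences_alt
  unfold Pre_search_sentences at hpre
  obtain ⟨sentences, hsome⟩ := Option.isSome_iff_exists.mp hpre
  rw [hsome]
  obtain ⟨h1, h2⟩ := pv_foldA_goB (PySem.Chars.lower search_word.toList) sentences [] 0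
  simp only [List.nil_append, Int.zero_add] at h1 h2
  simp only [h1, h2]
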